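-- pv_equiv track=rewrite | github.com/SDM-TIB/NormaKG | fragmentor/functions.py | fd_determination
-- ===== SOURCE A (Python) =====
-- def fd_determination(subject_attr,po_attr,fd):
--     for attr in subject_attr:
--         for po in po_attr:
--             if po not in subject_attr:
--                 if po in fd:
--                     if attr not in fd[po]:
--                         return False
--                 else:
--                     return False
--     return True
-- ===== SOURCE B (Python) =====
-- def fd_determination(subject_attr, po_attr, fd):
--     # Set-algebra formulation: the FD holds iff every po attribute outside the
--     # subject has an entry in fd whose value covers all subject attributes,
--     # i.e. the subject set survives intersecting with all those fd values.
--     if not subject_attr: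
--         return True
--     subject = set(subject_attr)
--     targets = set(po_attr) - subject
--     if not targets <= fd.keys():
--         return False
--     common = subject.intersection(*(fd[po] for po in targets))
--     return common == subject
-- ===== Notes on version B (the rewrite author's own statement) =====
-- stated objective: alternative
-- what changed: Replaces A's nested per-attribute x per-po membership scan with staged set algebra: compute targets = set(po_attr) - set(subject_attr), test targets <= fd.keys(), then intersect the subject set with all fd[po] at once and compare the result with the subject set by set equality.
import Mathlib
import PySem

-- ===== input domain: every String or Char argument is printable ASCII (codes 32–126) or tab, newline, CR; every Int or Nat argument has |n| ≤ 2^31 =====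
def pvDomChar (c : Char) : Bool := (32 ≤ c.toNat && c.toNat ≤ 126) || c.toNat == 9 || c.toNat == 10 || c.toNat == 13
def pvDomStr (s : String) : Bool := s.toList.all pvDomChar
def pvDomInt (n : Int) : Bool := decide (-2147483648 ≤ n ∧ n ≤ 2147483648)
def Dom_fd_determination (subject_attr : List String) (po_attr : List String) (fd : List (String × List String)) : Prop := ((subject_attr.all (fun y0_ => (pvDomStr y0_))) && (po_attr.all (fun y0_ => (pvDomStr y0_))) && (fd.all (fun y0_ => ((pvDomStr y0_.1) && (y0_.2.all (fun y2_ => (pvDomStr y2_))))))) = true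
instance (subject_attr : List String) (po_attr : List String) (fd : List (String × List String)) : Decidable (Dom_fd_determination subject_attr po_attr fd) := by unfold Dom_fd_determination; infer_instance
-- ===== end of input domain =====

-- B replaces A's nested per-attr × per-po membership scan by staged set algebra: targets =
-- set(po_attr) - subject, a key-coverage subset test, then one aggregate intersection of all
-- fd[po] with the subject set and a single set equality (objective: alternative).

-- ===== PORT A =====
-- nested for-loops with early 'return False' ported as nested List.all over the same state
def fd_determination (subject_attr : List String) (po_attr : List String) (fd : List (String × List String)) : Bool :=
  subject_attr.all (fun attr =>
    po_attr.all (fun po =>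
      if subject_attr.contains po then true
      else
        match (PySem.Dict.mk fd).get? po with
        | some v => v.contains attr
        | none => false))

-- ===== PORT B =====
-- subject.intersection(*(fd[po] for po in targets)) iterates over the set 'targets'; its
-- result and the final set equality are order-independent, so the fold over the Set's
-- list is exact; getD [] is only reached under the subset guard, where get? is some
def fd_determination_alt (subject_attr : List String) (po_attr : List String) (fd : List (String × List String)) : Bool :=
  if subject_attr.isEmpty then true
  else
    let subject : PySem.Set String := PySem.Set.ofList subject_attr
    let targets : PySem.Set String := PySem.Set.diff (PySem.Set.ofList po_attr) subject
    let d := PySem.Dict.mk fd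
    if ! PySem.Set.issubset targets d.keys then false
    else
      let common := targets.foldl (fun acc po => PySem.Set.inter acc (d.getD po [])) subject
      PySem.Set.equal common subject

-- ===== PRECONDITION & SPEC =====
def Spec_fd_determination (subject_attr : List String) (po_attr : List String) (fd : List (String × List String)) (out : Bool) : Prop := out = fd_determination_alt subject_attr po_attr fd
instance (subject_attr : List String) (po_attr : List String) (fd : List (String × List String)) (out : Bool) : Decidable (Spec_fd_determination subject_attr po_attr fd out) := by unfold Spec_fd_determination; infer_instance

-- ===== CLAIM (what is proved, stated in full; the proofs are below) =====
def Claim_equal_fd_determination : Prop := ∀ (subject_attr : List String) (po_attr : List String) (fd : List (String × List String)), Dom_fd_determination subject_attr po_attr fd → Spec_fd_determination subject_attr po_attr fd (fd_determination subject_attr po_attr fd)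

-- ===== LEMMAS AND PROOFS =====

theorem mem_foldl_inter (f : String → List String) :
    ∀ (l : List String) (s : List String) (x : String),
      x ∈ l.foldl (fun acc po => PySem.Set.inter acc (f po)) s ↔ x ∈ s ∧ ∀ po ∈ l, x ∈ f po := by
  intro l
  induction l with
  | nil => simp [List.foldl]
  | cons h t ih =>
    intro s x
    simp only [List.foldl_cons, ih, PySem.Set.mem_inter, List.mem_cons]
    constructor
    · rintro ⟨⟨hs, hf⟩, ht⟩
      refine ⟨hs, fun po hpo => ?_⟩
      rcases hpo with rfl | hpo
      · exact hf
      · exact ht po hpo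
    · rintro ⟨hs, hall⟩
      exact ⟨⟨hs, hall h (Or.inl rfl)⟩, fun po hpo => hall po (Or.inr hpo)⟩

theorem fd_determination_eq_alt (subject_attr po_attr : List String)
    (fd : List (String × List String)) :
    fd_determination subject_attr po_attr fd = fd_determination_alt subject_attr po_attr fd := by
  cases hsa : subject_attr with
  | nil => simp [fd_determination, fd_determination_alt]
  | cons h0 t0 =>
    rw [Bool.eq_iff_iff]
    set sa := h0 :: t0 with hsa'
    set d := PySem.Dict.mk fd with hd
    simp only [fd_determination, fd_determination_alt,
      List.all_eq_true, show sa.isEmpty = false from rfl, Bool.false_eq_true, if_false]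
    have hAiff : (∀ attr ∈ sa, ∀ po ∈ po_attr,
        (if sa.contains po then true
         else match d.get? po with
              | some v => v.contains attr
              | none => false) = true)
        ↔ (∀ attr ∈ sa, ∀ po ∈ po_attr, po ∉ sa →
            ∃ v, d.get? po = some v ∧ attr ∈ v) := by
      constructor
      · intro hA attr hattr po hpo hpn
        have := hA attr hattr po hpo
        rw [if_neg (by simpa using hpn)] at this
        cases hv : d.get? po with
        | none => rw [hv] at this; exact absurd this (by simp)
        | some v => rw [hv] at this; exact ⟨v, rfl, by simpa using this⟩
      · intro hB attr hattr po hpo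
        by_cases hc : po ∈ sa
        · rw [if_pos (by simpa using hc)]
        · rw [if_neg (by simpa using hc)]
          obtain ⟨v, hv, hm⟩ := hB attr hattr po hpo hc
          rw [hv]; simpa using hm
    rw [hAiff]
    have htmem : ∀ po, po ∈ PySem.Set.diff (PySem.Set.ofList po_attr) (PySem.Set.ofList sa)
        ↔ po ∈ po_attr ∧ po ∉ sa := by
      intro po
      rw [PySem.Set.mem_diff, PySem.Set.mem_ofList, PySem.Set.mem_ofList]
    by_cases hsub : PySem.Set.issubset (PySem.Set.diff (PySem.Set.ofList po_attr) (PySem.Set.ofList sa)) d.keys = true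
    · rw [hsub]
      simp only [Bool.not_true, Bool.false_eq_true, if_false]
      rw [PySem.Set.issubset_iff] at hsub
      rw [PySem.Set.equal_iff]
      constructor
      · intro hA x
        rw [mem_foldl_inter]
        constructor
        · rintro ⟨hx, _⟩; exact hx
        · intro hx
          refine ⟨hx, fun po hpo => ?_⟩
          rw [htmem] at hpo
          obtain ⟨v, hv, hm⟩ := hA x (by rwa [PySem.Set.mem_ofList] at hx) po hpo.1 hpo.2
          rw [PySem.Dict.getD_eq_get?_getD, hv]
          exact hm
      · intro hE attr hattr po hpo hpn
        have hT : po ∈ PySem.Set.diff (PySem.Set.ofList po_attr) (PySem.Set.ofList sa) := by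
          rw [htmem]; exact ⟨hpo, hpn⟩
        have hk := hsub po hT
        cases hv : d.get? po with
        | none =>
          rw [PySem.Dict.get?_eq_none_iff_not_mem_keys] at hv
          exact absurd hk hv
        | some v =>
          refine ⟨v, rfl, ?_⟩
          have hcm := (hE attr).mpr (by rw [PySem.Set.mem_ofList]; exact hattr)
          rw [mem_foldl_inter] at hcm
          have := hcm.2 po hT
          rwa [PySem.Dict.getD_eq_get?_getD, hv] at this
    · rw [Bool.eq_false_iff.mpr hsub]
      simp only [Bool.not_false, if_true, Bool.false_eq_true, iff_false]
      intro hA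
      have hne : ¬ ∀ x ∈ PySem.Set.diff (PySem.Set.ofList po_attr) (PySem.Set.ofList sa), x ∈ PySem.Dict.keys d := by
        intro h
        exact hsub (by rw [PySem.Set.issubset_iff]; exact h)
      push Not at hne
      obtain ⟨po, hpo, hk⟩ := hne
      rw [htmem] at hpo
      obtain ⟨v, hv, -⟩ := hA h0 (by simp [hsa']) po hpo.1 hpo.2
      rw [← PySem.Dict.get?_eq_none_iff_not_mem_keys] at hk
      rw [hv] at hk
      exact absurd hk (by simp)

-- ===== VERDICT (by name: the statement is the Claim_ definition above) =====
theorem fd_determination_spec : Claim_equal_fd_determination := by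
  intro sa pa fd _
  unfold Spec_fd_determination
  exact fd_determination_eq_alt sa pa fd
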